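-- pv_equiv track=rewrite | github.com/GaniKore2022/PYTHON_PRACTICE_PROBLEMS | diffofsum.py | diffofsum
-- ===== SOURCE A (Python) =====
-- def diffofsum(n,m):
--     d=0
--     nd=0
--     for i in range(1,m+1):
--         if i%n==0:
--             d+=i
--         else:
--             nd+=i
--     return abs(d-nd)
-- ===== SOURCE B (Python) =====
-- def diffofsum(n, m):
--     # Closed-form arithmetic series instead of a loop: O(1).
--     if m < 1:
--         return 0
--     total = m * (m + 1) // 2
--     k = m // abs(n)
--     mult = abs(n) * k * (k + 1) // 2
--     return abs(2 * mult - total)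
-- ===== Notes on version B (the rewrite author's own statement) =====
-- stated objective: faster
-- what changed: Replaces the O(m) loop that classifies each i in 1..m by a closed-form arithmetic-series computation (multiples sum = |n|*k*(k+1)/2 with k = m//|n|, total = m*(m+1)/2).
import Mathlib
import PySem

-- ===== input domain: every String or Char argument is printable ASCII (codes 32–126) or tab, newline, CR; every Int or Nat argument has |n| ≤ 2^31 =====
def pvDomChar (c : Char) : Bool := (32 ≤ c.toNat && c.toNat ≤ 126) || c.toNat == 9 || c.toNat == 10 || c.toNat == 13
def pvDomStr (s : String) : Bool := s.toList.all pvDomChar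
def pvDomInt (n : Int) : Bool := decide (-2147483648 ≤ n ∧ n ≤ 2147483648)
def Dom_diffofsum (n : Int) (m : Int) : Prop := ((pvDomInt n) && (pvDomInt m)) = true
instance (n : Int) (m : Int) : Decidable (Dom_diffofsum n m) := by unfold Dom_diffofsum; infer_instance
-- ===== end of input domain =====

-- B replaces A's O(m) classify-each-i loop by closed-form arithmetic series (objective: faster, asymptotic O(1) vs O(m)).

-- ===== PORT A =====
def diffofsum (n : Int) (m : Int) : Int :=
  let r := (PySem.List.pyRange 1 (m + 1) 1).foldl
    (fun (s : Int × Int) i =>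
      if PySem.Int.mod i n = 0 then (s.1 + i, s.2) else (s.1, s.2 + i)) (0, 0)
  |r.1 - r.2|

-- ===== PORT B =====
def diffofsum_alt (n : Int) (m : Int) : Int :=
  if m < 1 then 0
  else
    let total := PySem.Int.floordiv (m * (m + 1)) 2
    let k := PySem.Int.floordiv m |n|
    let mult := PySem.Int.floordiv (|n| * k * (k + 1)) 2
    |2 * mult - total|

-- ===== PRECONDITION & SPEC =====
-- Pre_ excludes exactly the inputs (n = 0 with m ≥ 1) on which A raises ZeroDivisionError.
def Pre_diffofsum (n : Int) (m : Int) : Prop := ¬ (n = 0 ∧ 1 ≤ m)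
instance (n : Int) (m : Int) : Decidable (Pre_diffofsum n m) := by unfold Pre_diffofsum; infer_instance
def pvWitness_diffofsum : Int × Int := (3, 10)
def Spec_diffofsum (n : Int) (m : Int) (out : Int) : Prop := out = diffofsum_alt n m
instance (n : Int) (m : Int) (out : Int) : Decidable (Spec_diffofsum n m out) := by unfold Spec_diffofsum; infer_instance

-- ===== CLAIM (what is proved, stated in full; the proofs are below) =====
def Claim_equal_diffofsum : Prop := ∀ (n : Int) (m : Int), Dom_diffofsum n m → Pre_diffofsum n m → Spec_diffofsum n m (diffofsum n m)

-- ===== LEMMAS AND PROOFS =====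

-- A's loop state after processing 1..M, for induction.
def pvLoopA (n : Int) (M : Nat) : Int × Int :=
  (PySem.List.pyRange 1 ((M : Int) + 1) 1).foldl
    (fun (s : Int × Int) i =>
      if PySem.Int.mod i n = 0 then (s.1 + i, s.2) else (s.1, s.2 + i)) (0, 0)

lemma pvFloordiv_succ_dvd {a M : Int} (ha : 0 < a) (h : a ∣ (M + 1)) :
    PySem.Int.floordiv (M + 1) a = PySem.Int.floordiv M a + 1 ∧
    a * (PySem.Int.floordiv M a + 1) = M + 1 := by
  obtain ⟨c, hc⟩ := h
  have h1 : PySem.Int.floordiv (M + 1) a = c := by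
    rw [PySem.Int.floordiv_eq_iff_of_pos ha]
    constructor <;> nlinarith
  have h2 : PySem.Int.floordiv M a = c - 1 := by
    rw [PySem.Int.floordiv_eq_iff_of_pos ha]
    constructor <;> nlinarith
  refine ⟨by omega, by rw [h2]; linarith [hc]⟩

lemma pvFloordiv_succ_not_dvd {a M : Int} (ha : 0 < a) (h : ¬ a ∣ (M + 1)) :
    PySem.Int.floordiv (M + 1) a = PySem.Int.floordiv M a := by
  have hk := (PySem.Int.floordiv_eq_iff_of_pos (a := M) ha (q := PySem.Int.floordiv M a)).mp rfl
  rw [PySem.Int.floordiv_eq_iff_of_pos ha]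
  refine ⟨by linarith [hk.1], ?_⟩
  rcases lt_or_eq_of_le (by linarith [hk.2] : M + 1 ≤ (PySem.Int.floordiv M a + 1) * a) with hlt | heq
  · exact hlt
  · exact absurd ⟨PySem.Int.floordiv M a + 1, by linarith [heq]⟩ h

lemma pvLoopA_inv (n : Int) (hn : n ≠ 0) (M : Nat) :
    2 * (pvLoopA n M).1 =
      |n| * PySem.Int.floordiv (M : Int) |n| * (PySem.Int.floordiv (M : Int) |n| + 1) ∧
    2 * ((pvLoopA n M).1 + (pvLoopA n M).2) = (M : Int) * ((M : Int) + 1) := by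
  have ha : 0 < |n| := abs_pos.mpr hn
  induction M with
  | zero =>
    have h0 : PySem.Int.floordiv (0 : Int) |n| = 0 := by
      rw [PySem.Int.floordiv_eq_iff_of_pos ha]; omega
    simp [pvLoopA, PySem.List.pyRange, h0]
  | succ M ih =>
    have hstep : pvLoopA n (M + 1) =
        (if PySem.Int.mod ((M : Int) + 1) n = 0
          then ((pvLoopA n M).1 + ((M : Int) + 1), (pvLoopA n M).2)
          else ((pvLoopA n M).1, (pvLoopA n M).2 + ((M : Int) + 1))) := by
      have hr : PySem.List.pyRange 1 (((M + 1 : Nat) : Int) + 1) 1 =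
          PySem.List.pyRange 1 ((M : Int) + 1) 1 ++ [(M : Int) + 1] := by
        have := PySem.List.pyRange_one_succ_right (a := 1) (b := (M : Int) + 1) (by omega)
        push_cast
        simpa using this
      simp only [pvLoopA, hr, List.foldl_append, List.foldl_cons, List.foldl_nil]
    have hdvd : PySem.Int.mod ((M : Int) + 1) n = 0 ↔ |n| ∣ ((M : Int) + 1) := by
      rw [PySem.Int.mod_eq_zero_iff_dvd, abs_dvd]
    by_cases h : |n| ∣ ((M : Int) + 1)
    · obtain ⟨hk, hm⟩ := pvFloordiv_succ_dvd ha h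
      rw [hstep, if_pos (hdvd.mpr h)]
      push_cast [hk]
      refine ⟨by nlinarith [ih.1, hm], by nlinarith [ih.2]⟩
    · have hk := pvFloordiv_succ_not_dvd ha h
      rw [hstep, if_neg (fun hc => h (hdvd.mp hc))]
      push_cast [hk]
      refine ⟨by simpa using ih.1, by nlinarith [ih.2]⟩

lemma pvHalf (x : Int) : PySem.Int.floordiv (2 * x) 2 = x := by
  rw [PySem.Int.floordiv_eq_ediv_of_pos (by norm_num)]
  omega

-- ===== VERDICT (by name: the statement is the Claim_ definition above) =====
theorem diffofsum_spec : Claim_equal_diffofsum := by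
  intro n m _ hpre
  unfold Spec_diffofsum diffofsum diffofsum_alt
  by_cases hm : m < 1
  · have hr : PySem.List.pyRange 1 (m + 1) 1 = [] := by
      simp [PySem.List.pyRange]; omega
    simp [hr, hm]
  · have hn : n ≠ 0 := fun h0 => hpre ⟨h0, by omega⟩
    have hm0 : 0 ≤ m := by omega
    obtain ⟨M, hM⟩ : ∃ M : Nat, m = (M : Int) := ⟨m.toNat, by omega⟩
    subst hM
    obtain ⟨h1, h2⟩ := pvLoopA_inv n hn M
    have hloop : (PySem.List.pyRange 1 ((M : Int) + 1) 1).foldl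
        (fun (s : Int × Int) i =>
          if PySem.Int.mod i n = 0 then (s.1 + i, s.2) else (s.1, s.2 + i)) (0, 0)
        = pvLoopA n M := rfl
    simp only [hloop, if_neg hm]
    have htot : PySem.Int.floordiv ((M : Int) * ((M : Int) + 1)) 2 =
        (pvLoopA n M).1 + (pvLoopA n M).2 := by rw [← h2, pvHalf]
    have hmult : PySem.Int.floordiv
        (|n| * PySem.Int.floordiv (M : Int) |n| * (PySem.Int.floordiv (M : Int) |n| + 1)) 2 =
        (pvLoopA n M).1 := by rw [← h1, pvHalf]
    simp only [htot, hmult]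
    congr 1
    ring
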